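-- pv_equiv track=rewrite | github.com/dgsim126/Algo_Study_2 | Programmers/김선엽/2504/250427/글자수.py | solution
-- ===== SOURCE A (Python) =====
-- def solution(str1, str2):
--     s_dic = {}
--     for s1 in str1:
--         if s1 not in s_dic:
--             s_dic[s1] = 0
--
--     for s2 in str2:
--         if s2 in s_dic:
--             s_dic[s2] += 1
--
--     max = 0
--     for value in s_dic.values():
--         if value > max:
--             max = value
--
--     return max
-- ===== SOURCE B (Python) =====
-- def solution(str1, str2):
--     return max((str2.count(ch) for ch in set(str1)), default=0)
-- ===== Notes on version B (the rewrite author's own statement) =====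
-- stated objective: simpler
-- what changed: A builds a zero-initialized dict from str1, makes a counting pass over str2 updating the table, then a third loop takes the max of the values; B inverts the traversal: for each distinct char of str1 it rescans str2 with str2.count and takes the max of those counts in one expression with default=0.
import Mathlib
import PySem

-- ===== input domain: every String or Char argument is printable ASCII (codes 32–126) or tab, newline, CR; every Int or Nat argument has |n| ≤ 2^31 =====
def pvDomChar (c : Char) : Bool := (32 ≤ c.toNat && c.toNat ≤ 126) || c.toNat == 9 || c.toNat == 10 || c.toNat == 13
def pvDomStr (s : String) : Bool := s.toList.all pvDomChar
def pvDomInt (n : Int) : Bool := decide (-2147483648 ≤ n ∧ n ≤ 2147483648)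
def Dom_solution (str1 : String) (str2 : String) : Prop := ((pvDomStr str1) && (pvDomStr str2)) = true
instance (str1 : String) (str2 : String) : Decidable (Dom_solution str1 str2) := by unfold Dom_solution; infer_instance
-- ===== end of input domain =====

-- B replaces A's dict table (zero-init from str1, one counting pass over str2, then a max
-- loop) with a single expression: max of str2.count(ch) over the distinct chars of str1,
-- default 0 — simpler, one line instead of three loops.


-- ===== PORT A =====
def solution (str1 : String) (str2 : String) : Int :=
  -- s_dic = {}; for s1 in str1: if s1 not in s_dic: s_dic[s1] = 0
  let d0 : PySem.Dict Char Int :=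
    str1.toList.foldl (fun d c => if d.contains c then d else d.insert c 0) PySem.Dict.empty
  -- for s2 in str2: if s2 in s_dic: s_dic[s2] += 1
  let d1 : PySem.Dict Char Int :=
    str2.toList.foldl (fun d c => if d.contains c then d.modify c 0 (· + 1) else d) d0
  -- max = 0; for value in s_dic.values(): if value > max: max = value; return max
  d1.values.foldl (fun m v => if v > m then v else m) 0

-- ===== PORT B =====
def solution_alt (str1 : String) (str2 : String) : Int :=
  -- max((str2.count(ch) for ch in set(str1)), default=0)
  -- (max over a set: the result is order-independent, so the Set's stored order is fine)
  match PySem.List.max?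
      ((PySem.Set.ofList str1.toList).map
        (fun ch => (PySem.Str.count str2 (String.ofList [ch]) : Int)))
      (fun y => y) with
  | none => 0
  | some m => m

-- ===== PRECONDITION & SPEC =====
def Spec_solution (str1 : String) (str2 : String) (out : Int) : Prop := out = solution_alt str1 str2
instance (str1 : String) (str2 : String) (out : Int) : Decidable (Spec_solution str1 str2 out) := by unfold Spec_solution; infer_instance

-- ===== CLAIM (what is proved, stated in full; the proofs are below) =====
def Claim_equal_solution : Prop := ∀ (str1 : String) (str2 : String), Dom_solution str1 str2 → Spec_solution str1 str2 (solution str1 str2)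

-- ===== LEMMAS AND PROOFS =====

-- count of a single-character substring is the character count
theorem count_go_singleton (c : Char) (l : List Char) : ∀ (fuel acc : Nat),
    l.length ≤ fuel → PySem.Chars.count.go [c] fuel l acc = acc + l.count c := by
  induction l with
  | nil =>
    intro fuel acc _
    cases fuel <;> simp [PySem.Chars.count.go]
  | cons h t ih =>
    intro fuel acc hf
    cases fuel with
    | zero => simp at hf
    | succ f =>
      have ht : t.length ≤ f := by simpa using hf
      by_cases hc : c = h
      · subst hc
        simp [PySem.Chars.count.go, List.isPrefixOf, ih f (acc + 1) ht]
        omega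
      · have : ([c].isPrefixOf (h :: t)) = false := by
          simp [List.isPrefixOf, hc]
        simp [PySem.Chars.count.go, this, ih f acc ht, Ne.symm hc]

theorem chars_count_singleton (s : List Char) (c : Char) :
    PySem.Chars.count s [c] = s.count c := by
  simpa [PySem.Chars.count] using count_go_singleton c s s.length 0 le_rfl

-- loop 1: building the zero-initialized table over the distinct chars of str1
theorem build_table (l : List Char) : ∀ (s : List Char),
    l.foldl (fun d c => if d.contains c then d else d.insert c 0)
      (PySem.Dict.mk (s.map (fun k => (k, (0 : Int)))))
    = PySem.Dict.mk ((PySem.Set.update s l).map (fun k => (k, (0 : Int)))) := by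
  induction l with
  | nil => intro s; simp [PySem.Set.update]
  | cons c t ih =>
    intro s
    by_cases hc : c ∈ s
    · have hcon : (PySem.Dict.mk (s.map (fun k => (k, (0 : Int))))).contains c = true := by
        simp [PySem.Dict.contains, List.any_map, Function.comp]
        exact hc
      have hadd : PySem.Set.add s c = s := by
        simp [PySem.Set.add, PySem.Set.contains, hc]
      simp only [List.foldl_cons, hcon, PySem.Set.update, ite_true]
      rw [show (t.foldl PySem.Set.add (PySem.Set.add s c)) = t.foldl PySem.Set.add s by rw [hadd]]
      simpa [PySem.Set.update] using ih s
    · have hcon : (PySem.Dict.mk (s.map (fun k => (k, (0 : Int))))).contains c = false := by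
        simp [PySem.Dict.contains, List.any_map, Function.comp]
        intro x hx
        exact fun h => hc (h ▸ hx)
      have hadd : PySem.Set.add s c = s ++ [c] := by
        simp [PySem.Set.add, PySem.Set.contains, hc]
      have hins : (PySem.Dict.mk (s.map (fun k => (k, (0 : Int))))).insert c 0
          = PySem.Dict.mk ((s ++ [c]).map (fun k => (k, (0 : Int)))) := by
        simp [PySem.Dict.insert, hcon]
      simp only [List.foldl_cons, hcon, Bool.false_eq_true, if_false, hins,
        PySem.Set.update]
      rw [show (t.foldl PySem.Set.add (PySem.Set.add s c)) = t.foldl PySem.Set.add (s ++ [c]) by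
        rw [hadd]]
      simpa [PySem.Set.update] using ih (s ++ [c])

-- loop 2: the counting pass over str2 on a table whose keys are nodup
theorem count_pass (l : List Char) : ∀ (s : List Char) (f : Char → Int), s.Nodup →
    l.foldl (fun d c => if d.contains c then d.modify c 0 (· + 1) else d)
      (PySem.Dict.mk (s.map (fun k => (k, f k))))
    = PySem.Dict.mk (s.map (fun k => (k, f k + l.count k))) := by
  induction l with
  | nil => intro s f _; simp
  | cons c t ih =>
    intro s f hs
    by_cases hc : c ∈ s
    · have hcon : (PySem.Dict.mk (s.map (fun k => (k, f k)))).contains c = true := by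
        simp [PySem.Dict.contains, List.any_map, Function.comp]
        exact hc
      have hget : (PySem.Dict.mk (s.map (fun k => (k, f k)))).getD c 0 = f c := by
        have hfind : s.find? (fun k => k == c) = some c := by
          rw [List.find?_eq_some_iff_append]
          obtain ⟨xs, ys, rfl⟩ := List.append_of_mem hc
          refine ⟨by simp, xs, ys, rfl, ?_⟩
          intro x hx
          have hx' : x ≠ c := by
            intro h; subst h
            exact (List.nodup_append.mp hs).2.2 x hx x List.mem_cons_self rfl
          simp [hx']
        simp [PySem.Dict.getD, PySem.Dict.get?, List.find?_map, Function.comp_def, hfind]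
      have hmod : (PySem.Dict.mk (s.map (fun k => (k, f k)))).modify c 0 (· + 1)
          = PySem.Dict.mk (s.map (fun k => (k, if k = c then f c + 1 else f k))) := by
        simp only [PySem.Dict.modify, hget, PySem.Dict.insert, hcon, ite_true,
          List.map_map]
        congr 1
        apply List.map_congr_left
        intro k _
        by_cases hk : k = c <;> simp [hk, Function.comp]
      simp only [List.foldl_cons, hcon, ite_true, hmod]
      rw [ih s _ hs]
      congr 1
      apply List.map_congr_left
      intro k _
      by_cases hk : k = c
      · subst hk; simp; omega
      · simp [hk, Ne.symm hk]
    · have hcon : (PySem.Dict.mk (s.map (fun k => (k, f k)))).contains c = false := by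
        simp [PySem.Dict.contains, List.any_map, Function.comp]
        intro x hx
        exact fun h => hc (h ▸ hx)
      simp only [List.foldl_cons, hcon, Bool.false_eq_true, if_false]
      rw [ih s f hs]
      congr 1
      apply List.map_congr_left
      intro k hk
      have : k ≠ c := fun h => hc (h ▸ hk)
      simp [Ne.symm this]

-- the running-max loop equals foldl max
theorem foldl_maxif (l : List Int) : ∀ (a : Int),
    l.foldl (fun m v => if v > m then v else m) a = l.foldl max a := by
  induction l with
  | nil => intro a; rfl
  | cons x t ih =>
    intro a
    have hmax : (if x > a then x else a) = max a x := by
      by_cases h : x > a <;> simp [h, max_def] <;> omega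
    simp [List.foldl_cons, hmax, ih]

-- foldl max dropping a 0 seed below a nonnegative head
theorem foldl_max_zero (x : Int) (t : List Int) (hx : 0 ≤ x) :
    (x :: t).foldl max 0 = t.foldl max x := by
  simp [List.foldl_cons, max_eq_right hx]

-- ===== VERDICT (by name: the statement is the Claim_ definition above) =====
theorem solution_spec : Claim_equal_solution := by
  intro str1 str2 _
  unfold Spec_solution solution solution_alt
  have h1 : str1.toList.foldl (fun d c => if d.contains c then d else d.insert c 0)
      PySem.Dict.empty
      = PySem.Dict.mk ((PySem.Set.ofList str1.toList).map (fun k => (k, (0 : Int)))) := by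
    have := build_table str1.toList []
    simpa [PySem.Dict.empty, PySem.Set.update, PySem.Set.ofList_eq_foldl] using this
  simp only [h1]
  rw [count_pass str2.toList _ _ (PySem.Set.nodup_ofList _)]
  have hvals : (PySem.Dict.mk ((PySem.Set.ofList str1.toList).map
        (fun k => (k, (0 : Int) + str2.toList.count k)))).values
      = (PySem.Set.ofList str1.toList).map (fun ch => ((str2.toList.count ch : Int))) := by
    simp [PySem.Dict.values, List.map_map, Function.comp]
  rw [hvals]
  have hcnt : ((PySem.Set.ofList str1.toList).map
        (fun ch => (PySem.Str.count str2 (String.ofList [ch]) : Int)))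
      = (PySem.Set.ofList str1.toList).map (fun ch => ((str2.toList.count ch : Int))) := by
    apply List.map_congr_left
    intro ch _
    simp [PySem.Str.count, String.toList_ofList, chars_count_singleton]
  rw [hcnt]
  rcases hL : (PySem.Set.ofList str1.toList).map (fun ch => ((str2.toList.count ch : Int))) with
    _ | ⟨x, t⟩
  · simp [PySem.List.max?]
  · rw [PySem.List.max?_id_cons]
    have hx : 0 ≤ x := by
      have : x ∈ (PySem.Set.ofList str1.toList).map
          (fun ch => ((str2.toList.count ch : Int))) := by rw [hL]; exact List.mem_cons_self
      obtain ⟨ch, _, rfl⟩ := List.mem_map.mp this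
      positivity
    rw [foldl_maxif, foldl_max_zero x t hx]
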